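-- pv_equiv track=rewrite | github.com/darbinreyes/subparprogrammer | python/python3tutorial/reasoning_problem2.py | init_conn_matrix
-- ===== SOURCE A (Python) =====
-- def init_conn_matrix(n):
--     """ Returns a top-left to bottom-right diagonally initialized matrix."""
--     #pass # TODO Implement me.
--
--     result = []
--     for i in range(n):
--         row = []
--         for j in range(n):
--             if i == j:
--                 row.append(True)
--             else:
--                 row.append(False)
--         result.append(row)
--
--     return result
-- ===== SOURCE B (Python) =====
-- def init_conn_matrix(n):
--     """ Returns a top-left to bottom-right diagonally initialized matrix."""
--     # Flat-buffer trick: repeating an (n+1)-long pattern (one True then n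
--     # Falses) n times puts a True every n+1 cells; cutting the buffer into n
--     # rows of width n makes those Trues land exactly on the diagonal.
--     if n <= 0:
--         return []
--     flat = ([True] + [False] * n) * n
--     return [flat[i * n : i * n + n] for i in range(n)]
-- ===== Notes on version B (the rewrite author's own statement) =====
-- stated objective: alternative
-- what changed: B replaces A's nested index loops with the flat-buffer trick: it repeats an (n+1)-long pattern (one True followed by n Falses) n times, so the Trues fall every n+1 cells, and then slices the buffer into n rows of width n, putting the Trues on the diagonal; no i==j test or per-cell loop is used.
import Mathlib
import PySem

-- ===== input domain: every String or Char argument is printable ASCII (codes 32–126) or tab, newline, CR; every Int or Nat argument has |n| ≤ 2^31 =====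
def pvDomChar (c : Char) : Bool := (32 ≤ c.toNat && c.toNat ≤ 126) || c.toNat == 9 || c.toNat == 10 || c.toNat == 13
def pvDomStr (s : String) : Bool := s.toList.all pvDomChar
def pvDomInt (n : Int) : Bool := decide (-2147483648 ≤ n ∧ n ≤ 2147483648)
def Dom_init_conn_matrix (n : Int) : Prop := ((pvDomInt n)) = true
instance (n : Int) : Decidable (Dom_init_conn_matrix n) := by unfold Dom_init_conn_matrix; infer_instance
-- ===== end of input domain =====

-- B builds the identity by the flat-buffer trick (repeat the (n+1)-long pattern
-- [True]+[False]*n n times and cut into rows of width n) instead of A's nested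
-- index loops with an i==j test; same O(n^2) cost, different algorithm.

-- ===== PORT A =====
def init_conn_matrix (n : Int) : List (List Bool) :=
  (PySem.List.pyRange 0 n 1).foldl (fun result i =>
    result ++ [(PySem.List.pyRange 0 n 1).foldl (fun row j =>
      if i = j then row ++ [true] else row ++ [false]) []]) []

-- ===== PORT B =====
def init_conn_matrix_alt (n : Int) : List (List Bool) :=
  if _h : n ≤ 0 then []
  else
    let flat := PySem.List.pyRepeat (true :: List.replicate n.toNat false) n
    (PySem.List.pyRange 0 n 1).map (fun i =>
      PySem.List.slice flat (some (i * n)) (some (i * n + n)))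

-- ===== PRECONDITION & SPEC =====
def Spec_init_conn_matrix (n : Int) (out : List (List Bool)) : Prop := out = init_conn_matrix_alt n
instance (n : Int) (out : List (List Bool)) : Decidable (Spec_init_conn_matrix n out) := by unfold Spec_init_conn_matrix; infer_instance

-- ===== CLAIM (what is proved, stated in full; the proofs are below) =====
def Claim_equal_init_conn_matrix : Prop := ∀ (n : Int), Dom_init_conn_matrix n → Spec_init_conn_matrix n (init_conn_matrix n)

-- ===== LEMMAS AND PROOFS =====

-- Closed map form shared by the two proofs.
def pvId (m : Nat) : List (List Bool) :=
  (List.range m).map (fun i => (List.range m).map (fun j => decide (i = j)))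

-- A's fold over pyRange is the map form.
theorem pvA_eq (n : Int) : init_conn_matrix n = pvId n.toNat := by
  unfold init_conn_matrix
  have hrow : ∀ i : Int, (PySem.List.pyRange 0 n 1).foldl (fun row j =>
      if i = j then row ++ [true] else row ++ [false]) []
      = (PySem.List.pyRange 0 n 1).map (fun j => decide (i = j)) := by
    intro i
    have := PySem.List.foldl_append_singleton_eq_map
      (l := PySem.List.pyRange 0 n 1) (f := fun j => decide (i = j))
      (acc := ([] : List Bool))
    refine .trans ?_ this
    apply PySem.List.foldl_congr_mem
    intro acc x _
    by_cases h : i = x <;> simp [h]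
  calc (PySem.List.pyRange 0 n 1).foldl (fun result i =>
        result ++ [(PySem.List.pyRange 0 n 1).foldl (fun row j =>
          if i = j then row ++ [true] else row ++ [false]) []]) []
      = (PySem.List.pyRange 0 n 1).map (fun i =>
          (PySem.List.pyRange 0 n 1).foldl (fun row j =>
            if i = j then row ++ [true] else row ++ [false]) []) :=
        PySem.List.foldl_append_singleton_eq_map ..
    _ = pvId n.toNat := by
        simp only [hrow]
        simp [pvId, PySem.List.pyRange_one, List.map_map, Function.comp_def]

-- Indexing into a repeated block: element k of (replicate c pat).flatten is pat[k % |pat|].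
theorem pvRepGet {α : Type} (c : Nat) (pat : List α) (k : Nat) (h : k < c * pat.length) :
    ((List.replicate c pat).flatten)[k]? = pat[k % pat.length]? := by
  induction c generalizing k with
  | zero => omega
  | succ d ih =>
    rw [List.replicate_succ, List.flatten_cons]
    by_cases hk : k < pat.length
    · rw [List.getElem?_append_left hk, Nat.mod_eq_of_lt hk]
    · have hle : pat.length ≤ k := by omega
      rw [List.getElem?_append_right hle, Nat.mod_eq_sub_mod hle]
      apply ih
      have hsm : (d + 1) * pat.length = d * pat.length + pat.length := by ring
      omega

-- The pattern true :: replicate m false read at r < m+1 is "is r zero".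
theorem pvPatGet (m r : Nat) (hr : r < m + 1) :
    (true :: List.replicate m false)[r]? = some (decide (r = 0)) := by
  rcases r with _ | r
  · simp
  · simp only [List.getElem?_cons_succ]
    rw [List.getElem?_replicate_of_lt (by omega)]
    simp

-- Diagonal arithmetic: (a*m + j) % (m+1) = 0 iff a = j, for a, j < m.
theorem pvDiagMod (m a j : Nat) (ha : a < m) (hj : j < m) :
    ((a * m + j) % (m + 1) = 0) ↔ a = j := by
  by_cases hcase : a ≤ j
  · have he : a * m + j = a * (m + 1) + (j - a) := by
      have h1 : a * (m + 1) = a * m + a := by ring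
      omega
    rw [he, Nat.add_comm, Nat.add_mul_mod_self_right, Nat.mod_eq_of_lt (by omega)]
    omega
  · obtain ⟨b, rfl⟩ : ∃ b, a = b + 1 := ⟨a - 1, by omega⟩
    have he : (b + 1) * m + j = b * (m + 1) + (m + j - b) := by
      have h1 : (b + 1) * m = b * m + m := by ring
      have h2 : b * (m + 1) = b * m + b := by ring
      omega
    rw [he, Nat.add_comm, Nat.add_mul_mod_self_right, Nat.mod_eq_of_lt (by omega)]
    omega

-- Row a of B's buffer cut is row a of the identity.
theorem pvRowB (m a : Nat) (ha : a < m) :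
    ((((List.replicate m (true :: List.replicate m false)).flatten).drop (a * m)).take m)
      = (List.range m).map (fun j => decide (a = j)) := by
  apply List.ext_getElem?
  intro j
  by_cases hj : j < m
  · rw [List.getElem?_take_of_lt hj, List.getElem?_drop]
    have hk : a * m + j < m * (m + 1) := by
      have h1 : (a + 1) * m = a * m + m := by ring
      have h2 : m * (m + 1) = m * m + m := by ring
      have h3 : (a + 1) * m ≤ m * m := Nat.mul_le_mul_right m (by omega)
      omega
    rw [pvRepGet m _ (a * m + j) (by simpa [Nat.mul_comm] using hk)]
    have hplen : (true :: List.replicate m false).length = m + 1 := by simp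
    rw [hplen, pvPatGet m _ (Nat.mod_lt _ (by omega))]
    rw [List.getElem?_map, List.getElem?_range hj]
    simp only [Option.map_some]
    congr 1
    exact decide_eq_decide.mpr (pvDiagMod m a j ha hj)
  · rw [List.getElem?_eq_none (by simp; omega),
        List.getElem?_eq_none (by simp; omega)]

-- B equals the map form.
theorem pvB_eq (n : Int) : init_conn_matrix_alt n = pvId n.toNat := by
  unfold init_conn_matrix_alt
  by_cases h : n ≤ 0
  · rw [dif_pos h]
    have : n.toNat = 0 := by omega
    simp [this, pvId]
  · rw [dif_neg h]
    obtain ⟨m, hm0, rfl⟩ : ∃ m : Nat, 0 < m ∧ n = (m : Int) := ⟨n.toNat, by omega, by omega⟩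
    unfold pvId
    rw [PySem.List.pyRange_one]
    simp only [Int.sub_zero, Int.toNat_natCast]
    rw [List.map_map]
    apply List.map_congr_left
    intro a hamem
    have ham : a < m := List.mem_range.mp hamem
    simp only [Function.comp_def, Int.zero_add]
    rw [show ((a : Nat) : Int) * ((m : Nat) : Int) = ((a * m : Nat) : Int) by push_cast; ring,
        show ((a * m : Nat) : Int) + ((m : Nat) : Int) = ((a * m + m : Nat) : Int) by push_cast; ring,
        PySem.List.slice_natCast]
    have hsub : a * m + m - a * m = m := by omega
    rw [hsub]
    have hrep : PySem.List.pyRepeat (true :: List.replicate m false) ((m : Nat) : Int)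
        = (List.replicate m (true :: List.replicate m false)).flatten := by
      simp [PySem.List.pyRepeat]
    rw [hrep]
    exact pvRowB m a ham

-- ===== VERDICT (by name: the statement is the Claim_ definition above) =====
theorem init_conn_matrix_spec : Claim_equal_init_conn_matrix := by
  intro n _
  unfold Spec_init_conn_matrix
  rw [pvA_eq, pvB_eq]
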